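-- pv_equiv track=rewrite | github.com/zikav1/Python-Labs | lab06/words.py | count_only
-- ===== SOURCE A (Python) =====
-- def count_only(word_list, provinces):
--     provinces_set = set(provinces)
--     my_dict = {}
--
--     for word in word_list:
--         if word in provinces_set:
--             if word in my_dict:
--                 my_dict[word] = my_dict.get(word) + 1
--             else:
--                 my_dict[word] = 1
--
--     return my_dict
-- ===== SOURCE B (Python) =====
-- def count_only(word_list, provinces):
--     prov = set(provinces)
--     return {w: word_list.count(w)
--             for w in dict.fromkeys(word_list) if w in prov}
-- ===== Notes on version B (the rewrite author's own statement) =====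
-- stated objective: simpler
-- what changed: Replaces the incremental per-word dict update loop with a single dict comprehension over the distinct words (dict.fromkeys), counting each province word once via word_list.count.
import Mathlib
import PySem

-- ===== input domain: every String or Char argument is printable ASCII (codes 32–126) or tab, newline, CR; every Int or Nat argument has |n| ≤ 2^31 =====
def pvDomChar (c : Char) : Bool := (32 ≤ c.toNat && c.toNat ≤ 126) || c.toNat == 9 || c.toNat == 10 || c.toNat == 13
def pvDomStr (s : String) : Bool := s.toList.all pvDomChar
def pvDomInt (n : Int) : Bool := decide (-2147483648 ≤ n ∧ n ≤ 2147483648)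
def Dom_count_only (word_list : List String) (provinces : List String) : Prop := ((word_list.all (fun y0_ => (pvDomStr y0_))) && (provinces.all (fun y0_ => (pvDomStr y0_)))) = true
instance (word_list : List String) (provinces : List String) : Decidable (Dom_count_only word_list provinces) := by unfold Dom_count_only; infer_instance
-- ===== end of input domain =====

-- B replaces A's incremental per-word dict-update loop with a dict comprehension over
-- the distinct words, counting each province word once via word_list.count (objective: simpler).

-- ===== PORT A =====
def count_only (word_list : List String) (provinces : List String) : List (String × Int) :=
  let provinces_set : PySem.Set String := PySem.Set.ofList provinces
  let my_dict : PySem.Dict String Int :=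
    word_list.foldl (fun d word =>
      if PySem.Set.contains provinces_set word then
        if d.contains word then d.insert word (d.getD word 0 + 1)
        else d.insert word 1
      else d) PySem.Dict.empty
  my_dict.items

-- ===== PORT B =====
def count_only_alt (word_list : List String) (provinces : List String) : List (String × Int) :=
  let prov : PySem.Set String := PySem.Set.ofList provinces
  ((PySem.List.dedup word_list).filter (fun w => PySem.Set.contains prov w)).map
    (fun w => (w, (PySem.List.count word_list w : Int)))

-- ===== PRECONDITION & SPEC =====
def Spec_count_only (word_list : List String) (provinces : List String) (out : List (String × Int)) : Prop := out = count_only_alt word_list provinces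
instance (word_list : List String) (provinces : List String) (out : List (String × Int)) : Decidable (Spec_count_only word_list provinces out) := by unfold Spec_count_only; infer_instance

-- ===== CLAIM (what is proved, stated in full; the proofs are below) =====
def Claim_equal_count_only : Prop := ∀ (word_list : List String) (provinces : List String), Dom_count_only word_list provinces → Spec_count_only word_list provinces (count_only word_list provinces)

-- ===== LEMMAS AND PROOFS =====

-- A's conditional insert-or-initialise step equals the unconditional getD-increment step.
theorem pv_step_eq (d : PySem.Dict String Int) (w : String) :
    (if d.contains w then d.insert w (d.getD w 0 + 1) else d.insert w 1) =
      d.insert w (d.getD w 0 + 1) := by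
  by_cases h : d.contains w = true
  · simp [h]
  · simp [h, PySem.Dict.getD_of_not_contains d 0 (by simpa using h)]

-- set(xs filtered by p) is set(xs) filtered by p (same first-occurrence order).
theorem pv_ofList_filter {α : Type} [BEq α] [LawfulBEq α] (p : α → Bool) (xs : List α) :
    PySem.Set.ofList (xs.filter p) = (PySem.Set.ofList xs).filter p := by
  induction xs using List.reverseRecOn with
  | nil => rfl
  | append_singleton xs x ih =>
    rw [List.filter_append, PySem.Set.ofList_append_singleton]
    by_cases hp : p x = true
    · rw [show List.filter p [x] = [x] by simp [hp], PySem.Set.ofList_append_singleton, ih]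
      by_cases hx : x ∈ xs
      · have hx1 : x ∈ (PySem.Set.ofList xs).filter p :=
          List.mem_filter.2 ⟨(PySem.Set.mem_ofList xs x).2 hx, hp⟩
        have hx2 : x ∈ PySem.Set.ofList xs := (PySem.Set.mem_ofList xs x).2 hx
        simp [PySem.Set.add, hx1, hx2]
      · have hx1 : x ∉ (PySem.Set.ofList xs).filter p := fun h =>
          hx ((PySem.Set.mem_ofList xs x).1 (List.mem_filter.1 h).1)
        have hx2 : x ∉ PySem.Set.ofList xs := fun h => hx ((PySem.Set.mem_ofList xs x).1 h)
        simp [PySem.Set.add, hx1, hx2, List.filter_append, hp]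
    · rw [show List.filter p [x] = [] by simp [hp], List.append_nil, ih, PySem.Set.add]
      by_cases hx : PySem.Set.contains (PySem.Set.ofList xs) x = true
      · rw [if_pos hx]
      · rw [if_neg hx, List.filter_append]
        simp [hp]

theorem count_only_eq_alt (word_list provinces : List String) :
    count_only word_list provinces = count_only_alt word_list provinces := by
  unfold count_only count_only_alt
  have hstep : (word_list.foldl (fun d word =>
      if PySem.Set.contains (PySem.Set.ofList provinces) word then
        if d.contains word then d.insert word (d.getD word 0 + 1)
        else d.insert word 1
      else d) PySem.Dict.empty) =
      PySem.Dict.counter (word_list.filter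
        (fun w => PySem.Set.contains (PySem.Set.ofList provinces) w)) := by
    rw [PySem.List.foldl_congr_mem _ _
        (fun d word => if PySem.Set.contains (PySem.Set.ofList provinces) word then
            d.insert word (d.getD word 0 + 1) else d) _
        (fun d w _ => by
          by_cases h : w ∈ provinces
          · simp [h, pv_step_eq]
          · simp [h]),
      PySem.List.foldl_if_eq_foldl_filter,
      PySem.Dict.foldl_insert_getD_add_one_eq_counter]
  simp only [hstep, PySem.Dict.items_counter, pv_ofList_filter, PySem.List.dedup_eq_ofList]
  apply List.map_congr_left
  intro w hw
  have hp := (List.mem_filter.1 hw).2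
  rw [PySem.List.count_eq, List.count_filter hp]

-- ===== VERDICT (by name: the statement is the Claim_ definition above) =====
theorem count_only_spec : Claim_equal_count_only := by
  intro word_list provinces _
  exact count_only_eq_alt word_list provinces
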